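-- pv_equiv track=rewrite | github.com/lclpsoz/competitive-programming | CF/305375/gen.py | conv_t
-- ===== SOURCE A (Python) =====
-- def conv_t(s):
--     cnt = 1
--     cur = s[0]
--     ans = ""
--     for i in range(1, len(s)):
--         if (s[i] != cur):
--             ans += cur
--             ans += hex(cnt)[2:]
--             cur = s[i]
--             cnt = 1
--         else:
--             cnt += 1
--     ans += cur
--     ans += hex(cnt)[2:]
--     return ans
-- ===== SOURCE B (Python) =====
-- def conv_t(s):
--     parts = []
--     i, n = 0, len(s)
--     while i < n:
--         j = i
--         while j < n and s[j] == s[i]: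
--             j += 1
--         parts.append(s[i] + format(j - i, 'x'))
--         i = j
--     return ''.join(parts)
-- ===== Notes on version B (the rewrite author's own statement) =====
-- stated objective: alternative
-- what changed: B scans each run with an index jump (two nested while loops finding run boundaries) and joins per-run parts, instead of A's per-character state machine carrying (cnt, cur) and growing the answer by string +=.
-- crash fix: On the empty string A raises IndexError (unconditional s[0]); B naturally returns ''. — e.g. on conv_t(""): A raises IndexError, B returns ""
import Mathlib
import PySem

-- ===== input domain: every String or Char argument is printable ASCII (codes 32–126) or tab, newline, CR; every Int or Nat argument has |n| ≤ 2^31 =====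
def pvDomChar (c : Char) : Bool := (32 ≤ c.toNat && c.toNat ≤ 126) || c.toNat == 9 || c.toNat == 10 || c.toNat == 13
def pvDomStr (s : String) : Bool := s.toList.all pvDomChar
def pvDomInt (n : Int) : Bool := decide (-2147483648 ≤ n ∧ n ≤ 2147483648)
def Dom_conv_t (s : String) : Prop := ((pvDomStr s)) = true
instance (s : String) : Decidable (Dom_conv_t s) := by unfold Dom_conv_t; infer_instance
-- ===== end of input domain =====

-- B run-length encodes by jumping from run boundary to run boundary and joining per-run parts,
-- instead of A's per-character state machine; same cost, different structure (objective: alternative).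

-- shared hex formatting: Python's hex(n)[2:] (in A) and format(n, 'x') (in B), n ≥ 1
def hexLC (n : Nat) : String := String.ofList (Nat.toDigits 16 n)

-- ===== PORT A =====
-- loop state (cnt, cur, ans); the for-loop over range(1, len(s)) is a fold over the tail.
def stepA (st : Nat × Char × String) (d : Char) : Nat × Char × String :=
  if d ≠ st.2.1 then (1, d, st.2.2 ++ String.singleton st.2.1 ++ hexLC st.1)
  else (st.1 + 1, st.2.1, st.2.2)

-- the two trailing 'ans +=' lines of A
def finA (st : Nat × Char × String) : String :=
  st.2.2 ++ String.singleton st.2.1 ++ hexLC st.1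

def conv_t (s : String) : String :=
  match s.toList with
  | [] => ""  -- Python raises IndexError here (s[0]); outside Pre_conv_t
  | c :: rest => finA (rest.foldl stepA (1, c, ""))

-- ===== PORT B =====
-- inner while loop of Source B: length of the maximal prefix of l equal to c (j - i - 1)
def countRun (c : Char) : List Char → Nat
  | [] => 0
  | d :: t => if d = c then countRun c t + 1 else 0

-- outer while loop of Source B: one (char, run length) part per run, then jump past the run;
-- fuel = remaining length makes the while loop structural (it only guards totality)
def runsBGo : Nat → List Char → List (Char × Nat)
  | _, [] => []
  | 0, _ :: _ => []
  | fuel + 1, c :: rest => (c, countRun c rest + 1) :: runsBGo fuel (rest.drop (countRun c rest))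

def runsB (l : List Char) : List (Char × Nat) := runsBGo l.length l

def conv_t_alt (s : String) : String :=
  String.join ((runsB s.toList).map (fun p => String.singleton p.1 ++ hexLC p.2))

-- ===== PRECONDITION & SPEC =====
-- Pre_ excludes exactly the empty string, on which A raises IndexError (s[0]).
def Pre_conv_t (s : String) : Prop := s ≠ ""
instance (s : String) : Decidable (Pre_conv_t s) := by unfold Pre_conv_t; infer_instance
def pvWitness_conv_t : String := "aab"

-- On the empty string A raises IndexError (unconditional s[0]); B naturally returns ''.
def Raises_conv_t (s : String) : Prop := s = ""
instance (s : String) : Decidable (Raises_conv_t s) := by unfold Raises_conv_t; infer_instance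
def pvRaiseWitness_conv_t : String := ""
def pvRaiseWitnessOut_conv_t : String := ""

def Spec_conv_t (s : String) (out : String) : Prop := out = conv_t_alt s
instance (s : String) (out : String) : Decidable (Spec_conv_t s out) := by unfold Spec_conv_t; infer_instance

-- ===== CLAIM (what is proved, stated in full; the proofs are below) =====
def Claim_equal_conv_t : Prop := ∀ (s : String), Dom_conv_t s → Pre_conv_t s → Spec_conv_t s (conv_t s)
def Claim_raises_conv_t : Prop := (∀ (s : String), Dom_conv_t s → Raises_conv_t s → ¬ Pre_conv_t s) ∧ (Dom_conv_t (pvRaiseWitness_conv_t) ∧ Raises_conv_t (pvRaiseWitness_conv_t) ∧ conv_t_alt (pvRaiseWitness_conv_t) = pvRaiseWitnessOut_conv_t)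

-- ===== LEMMAS AND PROOFS =====

def encB (p : Char × Nat) : String := String.singleton p.1 ++ hexLC p.2
def renderB (l : List (Char × Nat)) : String := String.join (l.map encB)

theorem foldl_append_str (l : List String) : ∀ (a : String),
    l.foldl (· ++ ·) a = a ++ l.foldl (· ++ ·) "" := by
  induction l with
  | nil => intro a; simp
  | cons b t ih =>
    intro a
    simp only [List.foldl_cons]
    rw [ih (a ++ b), ih ("" ++ b)]
    simp [String.append_assoc]

theorem renderB_cons (p : Char × Nat) (l : List (Char × Nat)) :
    renderB (p :: l) = encB p ++ renderB l := by
  simp only [renderB, String.join, List.map_cons, List.foldl_cons]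
  rw [foldl_append_str]
  simp

theorem push_append_str (a : String) (c : Char) (b : String) :
    a.push c ++ b = a ++ (String.singleton c ++ b) := by
  rw [String.push_eq_append, String.append_assoc]

theorem runsBGo_fuel : ∀ (f : Nat) (l : List Char), l.length ≤ f →
    runsBGo f l = runsBGo l.length l := by
  intro f
  induction f using Nat.strong_induction_on with
  | _ f ih =>
    intro l hl
    cases l with
    | nil => cases f <;> rfl
    | cons c rest =>
      cases f with
      | zero => simp at hl
      | succ f =>
        have hl' : rest.length ≤ f := by simp at hl; omega
        simp only [runsBGo, List.length_cons]
        congr 1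
        rw [ih f (by omega) _ (by simp; omega),
            ih rest.length (by omega) _ (by simp)]

theorem runsB_cons (c : Char) (rest : List Char) :
    runsB (c :: rest) = (c, countRun c rest + 1) :: runsB (rest.drop (countRun c rest)) := by
  simp only [runsB, List.length_cons, runsBGo]
  congr 1
  exact runsBGo_fuel rest.length _ (by simp)

-- A's fold, from state (n, c, ans), equals ans ++ the first run's part ++ B's rendering of the rest
theorem foldA_eq (rest : List Char) : ∀ (n : Nat) (c : Char) (ans : String),
    finA (rest.foldl stepA (n, c, ans))
    = ans ++ encB (c, n + countRun c rest) ++ renderB (runsB (rest.drop (countRun c rest))) := by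
  induction rest with
  | nil =>
    intro n c ans
    simp [finA, countRun, runsB, runsBGo, renderB, encB, String.join, push_append_str]
  | cons d t ih =>
    intro n c ans
    by_cases h : d = c
    · subst h
      rw [List.foldl_cons, show stepA (n, d, ans) d = (n + 1, d, ans) from by simp [stepA],
          show countRun d (d :: t) = countRun d t + 1 from by simp [countRun],
          List.drop_succ_cons, ih (n + 1) d ans,
          show n + 1 + countRun d t = n + (countRun d t + 1) from by omega]
    · rw [List.foldl_cons,
          show stepA (n, c, ans) d = (1, d, ans ++ String.singleton c ++ hexLC n) from by
            simp [stepA, h],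
          show countRun c (d :: t) = 0 from by simp [countRun, h],
          List.drop_zero, ih 1 d _, runsB_cons, renderB_cons,
          show (1 : Nat) + countRun d t = countRun d t + 1 from by omega]
      simp [encB, String.append_assoc, push_append_str]

-- ===== VERDICT (by name: the statement is the Claim_ definition above) =====
theorem conv_t_spec : Claim_equal_conv_t := by
  intro s _ hpre
  unfold Spec_conv_t conv_t conv_t_alt
  cases hl : s.toList with
  | nil => exact absurd (by rw [← s.ofList_toList, hl]) hpre
  | cons c rest =>
    show finA (rest.foldl stepA (1, c, "")) = renderB (runsB (c :: rest))
    rw [runsB_cons, renderB_cons, foldA_eq rest 1 c "",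
        show (1 : Nat) + countRun c rest = countRun c rest + 1 from by omega]
    simp

@[simp] theorem conv_t_raises : Claim_raises_conv_t := by
  unfold Claim_raises_conv_t
  exact ⟨fun s _ hr hp => hp hr, by decide⟩
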